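-- pv_equiv track=rewrite | github.com/GauthierLeCompte/PlagiarismDetector | src/main.py | find_candidate_pairs
-- ===== SOURCE A (Python) =====
-- def find_candidate_pairs(subvectors):
--     """
--     Returns all candidate pairs (subvectors with the same value)
--     :param subvectors: list of all the subvectors
--     :return: all candidate pairs
--     """
--     candidates = set()
--     non_candidates = set()
--
--     for article1 in subvectors:
--         for article2 in subvectors:
--             if article1 != article2:
--                 match = False
--                 temp_tuple1 = (article1, article2)
--                 temp_tuple2 = (article2, article1)
--
--                 for subvec1, subvec2 in zip(subvectors[article1], subvectors[article2]):
--                     if subvec1 == subvec2: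
--                         match += True
--                         if temp_tuple1 in candidates or temp_tuple2 in candidates:
--                             pass
--                         else:
--                             candidates.add(temp_tuple1)
--                         break
--                 if not match:
--                     if temp_tuple1 in non_candidates or temp_tuple2 in non_candidates:
--                         pass
--                     else:
--                         non_candidates.add(temp_tuple1)
--
--     return candidates, non_candidates
-- ===== SOURCE B (Python) =====
-- def find_candidate_pairs(subvectors):
--     keys = list(subvectors)
--     buckets = {}
--     for i, k in enumerate(keys):
--         for p, v in enumerate(subvectors[k]):
--             buckets.setdefault((p, v), []).append(i)
--     cand_idx = set()
--     for group in buckets.values():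
--         for a in range(len(group)):
--             for b in range(a + 1, len(group)):
--                 cand_idx.add((group[a], group[b]))
--     candidates = set()
--     non_candidates = set()
--     for i in range(len(keys)):
--         for j in range(i + 1, len(keys)):
--             pair = (keys[i], keys[j])
--             if (i, j) in cand_idx:
--                 candidates.add(pair)
--             else:
--                 non_candidates.add(pair)
--     return candidates, non_candidates
-- ===== Notes on version B (the rewrite author's own statement) =====
-- stated objective: faster
-- what changed: B replaces A's all-pairs scan (every ordered pair of articles compared element-by-element, with set look-ups to deduplicate orientations) by a positional hash index: one pass buckets article indices by (position, value), pairs within a bucket give the candidate index pairs, and a single triangular sweep over index pairs emits each unordered pair exactly once into candidates or non-candidates.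
import Mathlib
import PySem

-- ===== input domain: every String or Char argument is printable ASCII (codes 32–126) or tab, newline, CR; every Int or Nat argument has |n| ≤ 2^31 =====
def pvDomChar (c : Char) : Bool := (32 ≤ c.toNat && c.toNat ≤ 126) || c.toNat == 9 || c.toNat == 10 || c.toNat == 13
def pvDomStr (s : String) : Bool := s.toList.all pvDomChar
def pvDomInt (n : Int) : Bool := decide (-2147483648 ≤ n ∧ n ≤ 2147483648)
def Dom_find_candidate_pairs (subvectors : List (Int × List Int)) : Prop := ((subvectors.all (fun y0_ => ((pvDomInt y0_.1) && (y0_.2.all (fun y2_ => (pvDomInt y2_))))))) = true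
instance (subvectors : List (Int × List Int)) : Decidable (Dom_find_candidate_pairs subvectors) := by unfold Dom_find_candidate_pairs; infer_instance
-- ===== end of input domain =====

-- B replaces A's all-pairs element-by-element scan by a (position, value) bucket index over article
-- indices plus one triangular sweep over index pairs; equivalence is proved on all inputs.

-- ===== PORT A =====
-- the inner 'for subvec1, subvec2 in zip(...): if subvec1 == subvec2: ... break' loop of A:
-- its only effect is whether some aligned pair is equal (the insert happens once, at the break)
def pvMatch (v1 v2 : List Int) : Bool := (v1.zip v2).any (fun p => p.1 == p.2)

def find_candidate_pairs (subvectors : List (Int × List Int)) : (List (Int × Int)) × (List (Int × Int)) :=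
  let d := PySem.Dict.ofList subvectors
  d.keys.foldl (fun acc a1 =>
    d.keys.foldl (fun (acc : List (Int × Int) × List (Int × Int)) a2 =>
      if a1 != a2 then
        if pvMatch (d.getD a1 []) (d.getD a2 []) then
          if (a1, a2) ∈ acc.1 ∨ (a2, a1) ∈ acc.1 then acc
          else (PySem.Set.add acc.1 (a1, a2), acc.2)
        else
          if (a1, a2) ∈ acc.2 ∨ (a2, a1) ∈ acc.2 then acc
          else (acc.1, PySem.Set.add acc.2 (a1, a2))
      else acc) acc) ([], [])

-- ===== PORT B =====
def find_candidate_pairs_alt (subvectors : List (Int × List Int)) : (List (Int × Int)) × (List (Int × Int)) :=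
  let d := PySem.Dict.ofList subvectors
  let keys := d.keys
  let buckets := (PySem.List.enumerate keys).foldl (fun b ik =>
      (PySem.List.enumerate (d.getD ik.2 [])).foldl (fun (b : PySem.Dict (Int × Int) (List Int)) pv =>
        b.modify pv [] (fun g => g ++ [ik.1])) b) PySem.Dict.empty
  let candIdx := buckets.values.foldl (fun (s : PySem.Set (Int × Int)) g =>
      (PySem.List.pyRange 0 (g.length : Int) 1).foldl (fun s a =>
        (PySem.List.pyRange (a + 1) (g.length : Int) 1).foldl (fun s b2 =>
          PySem.Set.add s (PySem.List.pyGetD g a 0, PySem.List.pyGetD g b2 0)) s) s) PySem.Set.empty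
  (PySem.List.pyRange 0 (keys.length : Int) 1).foldl (fun acc i =>
    (PySem.List.pyRange (i + 1) (keys.length : Int) 1).foldl (fun (acc : List (Int × Int) × List (Int × Int)) j =>
      if (i, j) ∈ candIdx then (PySem.Set.add acc.1 (PySem.List.pyGetD keys i 0, PySem.List.pyGetD keys j 0), acc.2)
      else (acc.1, PySem.Set.add acc.2 (PySem.List.pyGetD keys i 0, PySem.List.pyGetD keys j 0))) acc) ([], [])

-- ===== PRECONDITION & SPEC =====
def Spec_find_candidate_pairs (subvectors : List (Int × List Int)) (out : (List (Int × Int)) × (List (Int × Int))) : Prop := out = find_candidate_pairs_alt subvectors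
instance (subvectors : List (Int × List Int)) (out : (List (Int × Int)) × (List (Int × Int))) : Decidable (Spec_find_candidate_pairs subvectors out) := by unfold Spec_find_candidate_pairs; infer_instance

-- ===== CLAIM (what is proved, stated in full; the proofs are below) =====
def Claim_equal_find_candidate_pairs : Prop := ∀ (subvectors : List (Int × List Int)), Dom_find_candidate_pairs subvectors → Spec_find_candidate_pairs subvectors (find_candidate_pairs subvectors)

-- ===== LEMMAS AND PROOFS =====

-- the per-pair predicate: articles a1 and a2 agree at some aligned position
def pvM (d : PySem.Dict Int (List Int)) (pr : Int × Int) : Bool :=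
  pvMatch (d.getD pr.1 []) (d.getD pr.2 [])

-- triangular pairs of a key list: (ks[i], ks[j]) for i < j, in lexicographic index order
def triPairs : List Int → List (Int × Int)
  | [] => []
  | k :: rest => rest.map (fun a2 => (k, a2)) ++ triPairs rest

-- triangular pairs whose first component lies in the prefix `pre`, partners drawn from the rest
def triSplit : List Int → List Int → List (Int × Int)
  | [], _ => []
  | k :: pre', suf => (pre' ++ suf).map (fun a2 => (k, a2)) ++ triSplit pre' suf

-- both ports compute this common normal form
def pvTarget (subvectors : List (Int × List Int)) : (List (Int × Int)) × (List (Int × Int)) :=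
  let d := PySem.Dict.ofList subvectors
  ((triPairs d.keys).filter (pvM d), (triPairs d.keys).filter (fun pr => !pvM d pr))

theorem pvMatch_symm (v1 v2 : List Int) : pvMatch v1 v2 = pvMatch v2 v1 := by
  unfold pvMatch
  rw [← List.zip_swap v2 v1, List.any_map]
  exact PySem.List.any_congr_mem (by intro x hx; simp [Function.comp, eq_comm])

theorem foldl_fix {α σ : Type} (f : σ → α → σ) (s : σ) :
    ∀ (l : List α), (∀ x ∈ l, f s x = s) → l.foldl f s = s := by
  intro l h
  induction l with
  | nil => rfl
  | cons x t ih =>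
    rw [List.foldl_cons, h x (List.mem_cons_self)]
    exact ih (fun y hy => h y (List.mem_cons_of_mem _ hy))

theorem foldl_foldl_flatMap {α β σ : Type} (l : List α) (g : α → List β) (f : σ → β → σ)
    (init : σ) : l.foldl (fun s i => (g i).foldl f s) init = (l.flatMap g).foldl f init := by
  induction l generalizing init with
  | nil => rfl
  | cons x t ih => rw [List.foldl_cons, List.flatMap_cons, List.foldl_append, ih]

theorem flatMap_congr_mem {α β : Type} {l : List α} {f g : α → List β}
    (h : ∀ x ∈ l, f x = g x) : l.flatMap f = l.flatMap g := by
  induction l with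
  | nil => rfl
  | cons x t ih =>
    rw [List.flatMap_cons, List.flatMap_cons, h x List.mem_cons_self,
      ih (fun y hy => h y (List.mem_cons_of_mem _ hy))]

theorem pairwise_flatMap_of {α β : Type} (R : β → β → Prop) (l : List α) (g : α → List β)
    (h1 : ∀ x ∈ l, (g x).Pairwise R)
    (h2 : l.Pairwise (fun x y => ∀ b ∈ g x, ∀ c ∈ g y, R b c)) :
    (l.flatMap g).Pairwise R := by
  induction l with
  | nil => simp
  | cons x t ih =>
    rw [List.flatMap_cons, List.pairwise_append]
    rcases List.pairwise_cons.mp h2 with ⟨hx, ht⟩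
    refine ⟨h1 x List.mem_cons_self, ih (fun y hy => h1 y (List.mem_cons_of_mem _ hy)) ht, ?_⟩
    intro b hb c hc
    rcases List.mem_flatMap.mp hc with ⟨y, hy, hcy⟩
    exact hx y hy b hb c hcy

theorem triPairs_append (pre suf : List Int) :
    triPairs (pre ++ suf) = triSplit pre suf ++ triPairs suf := by
  induction pre with
  | nil => simp [triSplit]
  | cons k pre' ih => simp [triPairs, triSplit, ih]

theorem triSplit_snoc (pre suf : List Int) (k : Int) :
    triSplit (pre ++ [k]) suf = triSplit pre (k :: suf) ++ suf.map (fun a2 => (k, a2)) := by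
  induction pre with
  | nil => simp [triSplit]
  | cons p pre' ih =>
    simp only [List.cons_append, triSplit, ih]
    rw [← List.append_cons]
    simp only [List.append_assoc]

theorem mem_triSplit_of (pre suf : List Int) (a2 k : Int) (h1 : a2 ∈ pre) (h2 : k ∈ suf) :
    (a2, k) ∈ triSplit pre suf := by
  induction pre with
  | nil => cases h1
  | cons p pre' ih =>
    rcases List.mem_cons.mp h1 with h | h
    · subst h
      exact List.mem_append_left _ (List.mem_map.mpr ⟨k, List.mem_append_right _ h2, rfl⟩)
    · exact List.mem_append_right _ (ih h)

theorem fst_mem_of_mem_triSplit (pre suf : List Int) (x y : Int)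
    (h : (x, y) ∈ triSplit pre suf) : x ∈ pre := by
  induction pre with
  | nil => cases h
  | cons p pre' ih =>
    rcases List.mem_append.mp h with h | h
    · rcases List.mem_map.mp h with ⟨a2, _, he⟩
      cases he
      exact List.mem_cons_self
    · exact List.mem_cons_of_mem _ (ih h)

theorem fst_mem_of_mem_triPairs (ks : List Int) (x y : Int)
    (h : (x, y) ∈ triPairs ks) : x ∈ ks := by
  induction ks with
  | nil => cases h
  | cons k rest ih =>
    rcases List.mem_append.mp h with h | h
    · rcases List.mem_map.mp h with ⟨a2, _, he⟩
      cases he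
      exact List.mem_cons_self
    · exact List.mem_cons_of_mem _ (ih h)

theorem nodup_triPairs (ks : List Int) (h : ks.Nodup) : (triPairs ks).Nodup := by
  induction ks with
  | nil => simp [triPairs]
  | cons k rest ih =>
    rcases List.nodup_cons.mp h with ⟨hk, hrest⟩
    rw [triPairs]
    refine List.Nodup.append ?_ (ih hrest) ?_
    · exact List.Nodup.map_on (fun a _ b _ hab => ((Prod.mk.injEq _ _ _ _).mp hab).2) hrest
    · intro p hp hp2
      rcases List.mem_map.mp hp with ⟨a2, _, he⟩
      subst he
      exact hk (fst_mem_of_mem_triPairs rest k a2 hp2)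

theorem split_checked (f : Int → Int × Int) (P : Int → Bool) :
    ∀ (L : List Int) (c nc : List (Int × Int)),
    (∀ x ∈ L, f x ∉ c ∧ (f x).swap ∉ c ∧ f x ∉ nc ∧ (f x).swap ∉ nc) →
    L.Pairwise (fun x y => f x ≠ f y ∧ (f x).swap ≠ f y) →
    L.foldl (fun acc x =>
      if P x then
        if f x ∈ acc.1 ∨ (f x).swap ∈ acc.1 then acc else (PySem.Set.add acc.1 (f x), acc.2)
      else
        if f x ∈ acc.2 ∨ (f x).swap ∈ acc.2 then acc else (acc.1, PySem.Set.add acc.2 (f x)))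
      (c, nc)
    = (c ++ (L.filter P).map f, nc ++ (L.filter (fun x => !P x)).map f) := by
  intro L
  induction L with
  | nil => intro c nc _ _; simp
  | cons x t ih =>
    intro c nc hf hp
    rcases hf x List.mem_cons_self with ⟨h1, h2, h3, h4⟩
    rcases List.pairwise_cons.mp hp with ⟨hx, ht⟩
    rw [List.foldl_cons]
    by_cases hP : P x = true
    · have hstep : (if P x then
          if f x ∈ c ∨ (f x).swap ∈ c then ((c, nc) : List (Int × Int) × List (Int × Int))
          else (PySem.Set.add c (f x), nc)
        else
          if f x ∈ nc ∨ (f x).swap ∈ nc then (c, nc)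
          else (c, PySem.Set.add nc (f x))) = (c ++ [f x], nc) := by
        rw [if_pos hP, if_neg (by tauto), PySem.Set.add_of_not_mem h1]
      rw [hstep, ih (c ++ [f x]) nc ?_ ht]
      · simp [hP]
      · intro y hy
        rcases hf y (List.mem_cons_of_mem _ hy) with ⟨g1, g2, g3, g4⟩
        rcases hx y hy with ⟨n1, n2⟩
        constructor
        · simp only [List.mem_append, List.mem_singleton]
          rintro (h | h)
          · exact g1 h
          · exact n1 h.symm
        refine ⟨?_, g3, g4⟩
        simp only [List.mem_append, List.mem_singleton]
        rintro (h | h)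
        · exact g2 h
        · apply n2
          rw [← h, Prod.swap_swap]
    · have hP' : P x = false := by simpa using hP
      have hstep : (if P x then
          if f x ∈ c ∨ (f x).swap ∈ c then ((c, nc) : List (Int × Int) × List (Int × Int))
          else (PySem.Set.add c (f x), nc)
        else
          if f x ∈ nc ∨ (f x).swap ∈ nc then (c, nc)
          else (c, PySem.Set.add nc (f x))) = (c, nc ++ [f x]) := by
        rw [hP']
        simp only [Bool.false_eq_true, if_false]
        rw [if_neg (by tauto), PySem.Set.add_of_not_mem h3]
      rw [hstep, ih c (nc ++ [f x]) ?_ ht]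
      · simp [hP']
      · intro y hy
        rcases hf y (List.mem_cons_of_mem _ hy) with ⟨g1, g2, g3, g4⟩
        rcases hx y hy with ⟨n1, n2⟩
        refine ⟨g1, g2, ?_, ?_⟩
        · simp only [List.mem_append, List.mem_singleton]
          rintro (h | h)
          · exact g3 h
          · exact n1 h.symm
        · simp only [List.mem_append, List.mem_singleton]
          rintro (h | h)
          · exact g4 h
          · apply n2
            rw [← h, Prod.swap_swap]

theorem split_add {α : Type} (f : α → Int × Int) (P : α → Prop) [DecidablePred P] :
    ∀ (L : List α) (c nc : List (Int × Int)),
    (L.map f).Nodup →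
    (∀ x ∈ L, f x ∉ c ∧ f x ∉ nc) →
    L.foldl (fun acc x =>
      if P x then (PySem.Set.add acc.1 (f x), acc.2)
      else (acc.1, PySem.Set.add acc.2 (f x))) (c, nc)
    = (c ++ (L.filter (fun x => decide (P x))).map f,
       nc ++ (L.filter (fun x => !decide (P x))).map f) := by
  intro L
  induction L with
  | nil => intro c nc _ _; simp
  | cons x t ih =>
    intro c nc hnd hf
    rcases hf x List.mem_cons_self with ⟨h1, h2⟩
    rw [List.map_cons, List.nodup_cons] at hnd
    rcases hnd with ⟨hx, ht⟩
    have hfresh : ∀ y ∈ t, (f y ∉ c ++ [f x] ∧ f y ∉ c) ∧ (f y ∉ nc ++ [f x] ∧ f y ∉ nc) := by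
      intro y hy
      rcases hf y (List.mem_cons_of_mem _ hy) with ⟨g1, g2⟩
      have hne : f y ≠ f x := by
        intro he
        exact hx (he ▸ List.mem_map_of_mem hy)

      constructor
      · refine ⟨?_, g1⟩
        simp only [List.mem_append, List.mem_singleton]
        rintro (h | h)
        · exact g1 h
        · exact hne h
      · refine ⟨?_, g2⟩
        simp only [List.mem_append, List.mem_singleton]
        rintro (h | h)
        · exact g2 h
        · exact hne h
    rw [List.foldl_cons]
    by_cases hP : P x
    · rw [if_pos hP]
      show List.foldl _ (PySem.Set.add c (f x), nc) _ = _
      rw [PySem.Set.add_of_not_mem h1,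
        ih (c ++ [f x]) nc ht (fun y hy => ⟨(hfresh y hy).1.1, (hfresh y hy).2.2⟩)]
      simp [hP]
    · rw [if_neg hP]
      show List.foldl _ (c, PySem.Set.add nc (f x)) _ = _
      rw [PySem.Set.add_of_not_mem h2,
        ih c (nc ++ [f x]) ht (fun y hy => ⟨(hfresh y hy).1.2, (hfresh y hy).2.1⟩)]
      simp [hP]

-- ===== A reduces to the normal form =====

theorem A_outer (d : PySem.Dict Int (List Int)) (keysAll : List Int) (hnd : keysAll.Nodup) :
    ∀ (suf pre : List Int), keysAll = pre ++ suf →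
    suf.foldl (fun acc a1 =>
      keysAll.foldl (fun (acc : List (Int × Int) × List (Int × Int)) a2 =>
        if a1 != a2 then
          if pvMatch (d.getD a1 []) (d.getD a2 []) then
            if (a1, a2) ∈ acc.1 ∨ (a2, a1) ∈ acc.1 then acc
            else (PySem.Set.add acc.1 (a1, a2), acc.2)
          else
            if (a1, a2) ∈ acc.2 ∨ (a2, a1) ∈ acc.2 then acc
            else (acc.1, PySem.Set.add acc.2 (a1, a2))
        else acc) acc)
      ((triSplit pre suf).filter (pvM d), (triSplit pre suf).filter (fun pr => !pvM d pr))
    = ((triPairs keysAll).filter (pvM d), (triPairs keysAll).filter (fun pr => !pvM d pr)) := by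
  intro suf
  induction suf with
  | nil =>
    intro pre hpre
    rw [List.foldl_nil, hpre, triPairs_append]
    simp [triPairs]
  | cons k suf' ih =>
    intro pre hpre
    -- facts from nodup
    have hnd' := hnd
    rw [hpre] at hnd'
    rcases List.nodup_append.mp hnd' with ⟨hpre_nd, hsuf_nd, hdisj⟩
    rcases List.nodup_cons.mp hsuf_nd with ⟨hk_suf, hsuf'_nd⟩
    have hk_pre : k ∉ pre := fun h => hdisj k h k List.mem_cons_self rfl
    set C := (triSplit pre (k :: suf')).filter (pvM d) with hC
    set N := (triSplit pre (k :: suf')).filter (fun pr => !pvM d pr) with hN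
    rw [List.foldl_cons]
    -- the inner loop over keysAll = pre ++ k :: suf'
    have hinner :
        keysAll.foldl (fun (acc : List (Int × Int) × List (Int × Int)) a2 =>
          if k != a2 then
            if pvMatch (d.getD k []) (d.getD a2 []) then
              if (k, a2) ∈ acc.1 ∨ (a2, k) ∈ acc.1 then acc
              else (PySem.Set.add acc.1 (k, a2), acc.2)
            else
              if (k, a2) ∈ acc.2 ∨ (a2, k) ∈ acc.2 then acc
              else (acc.1, PySem.Set.add acc.2 (k, a2))
          else acc) (C, N)
        = ((triSplit (pre ++ [k]) suf').filter (pvM d),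
           (triSplit (pre ++ [k]) suf').filter (fun pr => !pvM d pr)) := by
      rw [hpre, List.foldl_append, List.foldl_cons]
      -- (a) the prefix leaves the state unchanged
      have hfixed : List.foldl (fun (acc : List (Int × Int) × List (Int × Int)) a2 =>
          if k != a2 then
            if pvMatch (d.getD k []) (d.getD a2 []) then
              if (k, a2) ∈ acc.1 ∨ (a2, k) ∈ acc.1 then acc
              else (PySem.Set.add acc.1 (k, a2), acc.2)
            else
              if (k, a2) ∈ acc.2 ∨ (a2, k) ∈ acc.2 then acc
              else (acc.1, PySem.Set.add acc.2 (k, a2))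
          else acc) (C, N) pre = (C, N) := by
        apply foldl_fix
        intro a2 ha2
        have hne : k ≠ a2 := fun h => hk_pre (h ▸ ha2)
        rw [if_pos (by simpa [bne] using hne)]
        by_cases hm : pvMatch (d.getD k []) (d.getD a2 []) = true
        · rw [if_pos hm, if_pos ?_]
          right
          rw [hC, List.mem_filter]
          refine ⟨mem_triSplit_of _ _ _ _ ha2 List.mem_cons_self, ?_⟩
          show pvM d (a2, k) = true
          unfold pvM
          rw [pvMatch_symm]
          exact hm
        · rw [if_neg (by simpa using hm), if_pos ?_]
          right
          rw [hN, List.mem_filter]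
          refine ⟨mem_triSplit_of _ _ _ _ ha2 List.mem_cons_self, ?_⟩
          show (!pvM d (a2, k)) = true
          unfold pvM
          rw [pvMatch_symm]
          simpa using hm
      rw [hfixed]
      -- (b) the element k itself is skipped
      have hself : (if k != k then
          if pvMatch (d.getD k []) (d.getD k []) then
            if (k, k) ∈ C ∨ (k, k) ∈ C then ((C, N) : List (Int × Int) × List (Int × Int))
            else (PySem.Set.add C (k, k), N)
          else
            if (k, k) ∈ N ∨ (k, k) ∈ N then (C, N)
            else (C, PySem.Set.add N (k, k))
        else (C, N)) = (C, N) := by simp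
      rw [hself]
      -- (c) the suffix appends fresh pairs, split by match
      have hcongr : List.foldl (fun (acc : List (Int × Int) × List (Int × Int)) a2 =>
          if k != a2 then
            if pvMatch (d.getD k []) (d.getD a2 []) then
              if (k, a2) ∈ acc.1 ∨ (a2, k) ∈ acc.1 then acc
              else (PySem.Set.add acc.1 (k, a2), acc.2)
            else
              if (k, a2) ∈ acc.2 ∨ (a2, k) ∈ acc.2 then acc
              else (acc.1, PySem.Set.add acc.2 (k, a2))
          else acc) (C, N) suf'
        = List.foldl (fun (acc : List (Int × Int) × List (Int × Int)) a2 =>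
            if (fun x => pvMatch (d.getD k []) (d.getD x [])) a2 then
              if (fun x => (k, x)) a2 ∈ acc.1 ∨ ((fun x => (k, x)) a2).swap ∈ acc.1 then acc
              else (PySem.Set.add acc.1 ((fun x => (k, x)) a2), acc.2)
            else
              if (fun x => (k, x)) a2 ∈ acc.2 ∨ ((fun x => (k, x)) a2).swap ∈ acc.2 then acc
              else (acc.1, PySem.Set.add acc.2 ((fun x => (k, x)) a2)) ) (C, N) suf' := by
        apply PySem.List.foldl_congr_mem
        intro acc a2 ha2
        have hne : k ≠ a2 := fun h => hk_suf (h ▸ ha2)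
        rw [if_pos (by simpa [bne] using hne)]
        rfl
      rw [hcongr, split_checked (fun x => (k, x)) (fun x => pvMatch (d.getD k []) (d.getD x [])) suf' C N ?_ ?_]
      · -- assemble into triSplit (pre ++ [k]) suf'
        rw [triSplit_snoc, List.filter_append, List.filter_append, ← hC, ← hN]
        congr 1
        · congr 1
          rw [List.filter_map]
          congr 1
        · congr 1
          rw [List.filter_map]
          congr 1
      · -- freshness of all pairs (k, a2), (a2, k) w.r.t. C and N
        intro a2 ha2
        have ha2_pre : a2 ∉ pre := fun h => hdisj a2 h a2 (List.mem_cons_of_mem _ ha2) rfl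
        have hCfst : ∀ x y, (x, y) ∈ C → x ∈ pre := by
          intro x y hxy
          exact fst_mem_of_mem_triSplit _ _ _ _ (List.mem_filter.mp hxy).1
        have hNfst : ∀ x y, (x, y) ∈ N → x ∈ pre := by
          intro x y hxy
          exact fst_mem_of_mem_triSplit _ _ _ _ (List.mem_filter.mp hxy).1
        exact ⟨fun h => hk_pre (hCfst _ _ h), fun h => ha2_pre (hCfst _ _ h),
          fun h => hk_pre (hNfst _ _ h), fun h => ha2_pre (hNfst _ _ h)⟩
      · -- pairwise distinctness along suf'
        have := hsuf'_nd
        rw [List.nodup_iff_pairwise_ne] at this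
        refine this.imp_of_mem ?_
        intro a b ha hb hab
        refine ⟨fun h => hab ((Prod.mk.injEq _ _ _ _).mp h).2, fun h => ?_⟩
        have : a = k := ((Prod.mk.injEq _ _ _ _).mp h).1
        exact hk_suf (this ▸ ha)
    rw [hinner]
    exact ih (pre ++ [k]) (by rw [hpre, List.append_assoc]; rfl)

theorem A_eq (subvectors : List (Int × List Int)) :
    find_candidate_pairs subvectors = pvTarget subvectors := by
  unfold find_candidate_pairs pvTarget
  have h := A_outer (PySem.Dict.ofList subvectors) (PySem.Dict.ofList subvectors).keys
    (PySem.Dict.nodup_keys_ofList subvectors) (PySem.Dict.ofList subvectors).keys [] rfl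
  simpa [triSplit] using h

-- ===== B reduces to the normal form =====

-- the flat stream of (position, value) keyed article indices that builds the buckets
def pvE (d : PySem.Dict Int (List Int)) (keys : List Int) : List ((Int × Int) × Int) :=
  (PySem.List.enumerate keys).flatMap (fun ik =>
    (PySem.List.enumerate (d.getD ik.2 [])).map (fun pv => (pv, ik.1)))

def pvGroup (d : PySem.Dict Int (List Int)) (keys : List Int) (q : Int × Int) : List Int :=
  ((pvE d keys).filter (fun e => e.1 == q)).map (·.2)

def pvPairsOf (g : List Int) : List (Int × Int) :=
  (PySem.List.pyRange 0 (g.length : Int) 1).flatMap (fun a =>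
    (PySem.List.pyRange (a + 1) (g.length : Int) 1).map (fun b =>
      (PySem.List.pyGetD g a 0, PySem.List.pyGetD g b 0)))


theorem pyRange_one_shift (a b : Int) :
    PySem.List.pyRange (a + 1) (b + 1) 1 = (PySem.List.pyRange a b 1).map (· + 1) := by
  apply List.ext_getElem
  · simp only [PySem.List.length_pyRange_one, List.length_map]
    omega
  · intro n h1 h2
    simp only [PySem.List.getElem_pyRange_one, List.getElem_map]
    omega

theorem pyGetD_cons_succ (k : Int) (rest : List Int) (i : Int) (hi : 0 ≤ i) :
    PySem.List.pyGetD (k :: rest) (i + 1) 0 = PySem.List.pyGetD rest i 0 := by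
  obtain ⟨n, rfl⟩ := Int.eq_ofNat_of_zero_le hi
  have h : ((n : Int) + 1) = ((n + 1 : Nat) : Int) := by push_cast; ring
  rw [h, PySem.List.pyGetD_natCast, PySem.List.pyGetD_natCast]
  rfl

theorem pyGetD_cons_zero (k : Int) (rest : List Int) :
    PySem.List.pyGetD (k :: rest) 0 0 = k := by
  rw [show (0 : Int) = ((0 : Nat) : Int) from rfl, PySem.List.pyGetD_natCast]
  rfl

theorem pyGetD_eq_getElem (xs : List Int) (n : Nat) (h : n < xs.length) :
    PySem.List.pyGetD xs (n : Int) 0 = xs[n] := by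
  rw [PySem.List.pyGetD_natCast]
  exact List.getD_eq_getElem xs 0 h

theorem flatMap_filter {α β : Type} (l : List α) (f : α → List β) (p : β → Bool) :
    (l.flatMap f).filter p = l.flatMap (fun x => (f x).filter p) := by
  induction l with
  | nil => rfl
  | cons x t ih => rw [List.flatMap_cons, List.flatMap_cons, List.filter_append, ih]

theorem flatMap_map {α β γ : Type} (l : List α) (f : α → List β) (g : β → γ) :
    (l.flatMap f).map g = l.flatMap (fun x => (f x).map g) := by
  induction l with
  | nil => rfl
  | cons x t ih => rw [List.flatMap_cons, List.flatMap_cons, List.map_append, ih]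

theorem map_flatMap_comm {α β γ : Type} (l : List α) (f : α → β) (g : β → List γ) :
    (l.map f).flatMap g = l.flatMap (fun x => g (f x)) := by
  induction l with
  | nil => rfl
  | cons x t ih => rw [List.map_cons, List.flatMap_cons, List.flatMap_cons, ih]

theorem pairwise_of_length_le_one {α : Type} {R : α → α → Prop} (l : List α)
    (h : l.length ≤ 1) : l.Pairwise R := by
  match l with
  | [] => exact List.Pairwise.nil
  | [a] => exact List.pairwise_singleton R a
  | a :: b :: t => simp at h

theorem triIdx_map_eq (ks : List Int) :
    (PySem.List.pyRange 0 (ks.length : Int) 1).flatMap (fun i =>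
      (PySem.List.pyRange (i + 1) (ks.length : Int) 1).map (fun j =>
        (PySem.List.pyGetD ks i 0, PySem.List.pyGetD ks j 0)))
    = triPairs ks := by
  induction ks with
  | nil => simp [PySem.List.pyRange_one_eq_nil, triPairs]
  | cons k rest ih =>
    have hlen : ((k :: rest).length : Int) = (rest.length : Int) + 1 := by
      simp only [List.length_cons]
      push_cast
      ring
    rw [hlen, PySem.List.pyRange_one_cons (by positivity), List.flatMap_cons]
    have hblock0 : (PySem.List.pyRange (0 + 1) ((rest.length : Int) + 1) 1).map (fun j =>
        (PySem.List.pyGetD (k :: rest) 0 0, PySem.List.pyGetD (k :: rest) j 0))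
        = rest.map (fun a2 => (k, a2)) := by
      rw [pyRange_one_shift 0 (rest.length : Int), List.map_map]
      have hcong : ∀ j ∈ PySem.List.pyRange 0 (rest.length : Int) 1,
          ((fun j => (PySem.List.pyGetD (k :: rest) 0 0, PySem.List.pyGetD (k :: rest) j 0)) ∘
            (fun x => x + 1)) j
          = ((fun a2 => ((k : Int), a2)) ∘ (fun j => PySem.List.pyGetD rest j 0)) j := by
        intro j hj
        rcases PySem.List.mem_pyRange_one.mp hj with ⟨hj0, _⟩
        simp only [Function.comp_apply]
        rw [pyGetD_cons_zero, pyGetD_cons_succ k rest j hj0]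
      rw [List.map_congr_left hcong, ← List.map_map,
        PySem.List.map_pyGetD_pyRange_zero' rest 0]
    rw [hblock0]
    congr 1
    rw [show (0 : Int) + 1 = 0 + 1 from rfl, pyRange_one_shift 0 (rest.length : Int),
      map_flatMap_comm, ← ih]
    apply flatMap_congr_mem
    intro i hi
    rcases PySem.List.mem_pyRange_one.mp hi with ⟨hi0, hiN⟩
    rw [pyRange_one_shift (i + 1) (rest.length : Int), List.map_map]
    apply List.map_congr_left
    intro j hj
    rcases PySem.List.mem_pyRange_one.mp hj with ⟨hj0, _⟩
    simp only [Function.comp_apply]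
    rw [pyGetD_cons_succ k rest i hi0, pyGetD_cons_succ k rest j (by omega)]

theorem filter_len_le_one {α : Type} [BEq α] [LawfulBEq α] {R : α → α → Prop} (l : List α)
    (hl : l.Pairwise R) (q : α) (hirr : ¬ R q q) : (l.filter (· == q)).length ≤ 1 := by
  have hp : (l.filter (· == q)).Pairwise R := hl.sublist List.filter_sublist
  have hq : ∀ x ∈ l.filter (· == q), x = q := by
    intro x hx
    exact eq_of_beq (List.mem_filter.mp hx).2
  rcases hfl : l.filter (· == q) with _ | ⟨a, _ | ⟨b, t⟩⟩
  · simp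
  · simp
  · exfalso
    rw [hfl] at hp hq
    rcases List.pairwise_cons.mp hp with ⟨hab, _⟩
    have h2 := hab b (List.mem_cons_self)
    rw [hq a List.mem_cons_self, hq b (List.mem_cons_of_mem _ List.mem_cons_self)] at h2
    exact hirr h2

theorem mem_inner_block (v : List Int) (t : Int) (q : Int × Int) (b : Int)
    (hb : b ∈ ((((PySem.List.enumerate v).map (fun pv => (pv, t))).filter
      (fun e => e.1 == q)).map (·.2))) : b = t := by
  rcases List.mem_map.mp hb with ⟨e, he, rfl⟩
  rcases List.mem_filter.mp he with ⟨heM, _⟩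
  rcases List.mem_map.mp heM with ⟨pv, _, rfl⟩
  rfl

theorem pvGroup_pairwise (d : PySem.Dict Int (List Int)) (keys : List Int) (q : Int × Int) :
    (pvGroup d keys q).Pairwise (· < ·) := by
  unfold pvGroup pvE
  rw [flatMap_filter, flatMap_map]
  apply pairwise_flatMap_of
  · intro ik _
    apply List.Pairwise.map
    · intro a b hab
      exact hab
    rw [List.filter_map]
    apply pairwise_of_length_le_one
    rw [List.length_map]
    have hle := filter_len_le_one (R := fun (p q' : Int × Int) => p.1 < q'.1)
      (PySem.List.enumerate (d.getD ik.2 [])) (PySem.List.pairwise_lt_enumerate _ _) q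
      (lt_irrefl _)
    calc ((PySem.List.enumerate (d.getD ik.2 [])).filter
          (fun pv => (fun e => e.1 == q) ((fun pv => (pv, ik.1)) pv))).length
        = ((PySem.List.enumerate (d.getD ik.2 [])).filter (· == q)).length := rfl
      _ ≤ 1 := hle
  · apply List.Pairwise.imp ?_ (PySem.List.pairwise_lt_enumerate keys 0)
    intro ik1 ik2 hlt b hb c hc
    rw [mem_inner_block _ _ _ _ hb, mem_inner_block _ _ _ _ hc]
    exact hlt

theorem mem_pvGroup (d : PySem.Dict Int (List Int)) (keys : List Int) (q : Int × Int) (i : Int) :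
    i ∈ pvGroup d keys q ↔ ∃ (a : Nat) (ha : a < keys.length), i = (a : Int) ∧
      ∃ (p : Nat) (hp : p < (d.getD keys[a] []).length), q = ((p : Int), (d.getD keys[a] [])[p]) := by
  unfold pvGroup pvE
  constructor
  · intro h
    rcases List.mem_map.mp h with ⟨e, he, rfl⟩
    rcases List.mem_filter.mp he with ⟨heE, heq⟩
    rcases List.mem_flatMap.mp heE with ⟨ik, hik, hein⟩
    rcases (PySem.List.mem_enumerate_iff _ _ _).mp hik with ⟨a, ha, rfl⟩
    rcases List.mem_map.mp hein with ⟨pv, hpv, rfl⟩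
    rcases (PySem.List.mem_enumerate_iff _ _ _).mp hpv with ⟨p, hp, rfl⟩
    refine ⟨a, ha, by simp, p, hp, ?_⟩
    have := eq_of_beq heq
    simp only at this
    rw [← this]
    simp
  · rintro ⟨a, ha, rfl, p, hp, rfl⟩
    apply List.mem_map.mpr
    refine ⟨(((p : Int), (d.getD keys[a] [])[p]), (a : Int)), ?_, rfl⟩
    apply List.mem_filter.mpr
    constructor
    · apply List.mem_flatMap.mpr
      refine ⟨((a : Int), keys[a]), ?_, ?_⟩
      · exact (PySem.List.mem_enumerate_iff _ _ _).mpr ⟨a, ha, by simp⟩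
      · apply List.mem_map.mpr
        refine ⟨((p : Int), (d.getD keys[a] [])[p]), ?_, rfl⟩
        exact (PySem.List.mem_enumerate_iff _ _ _).mpr ⟨p, hp, by simp⟩
    · simp

theorem mem_pvPairsOf (g : List Int) (hg : g.Pairwise (· < ·)) (x y : Int) (hxy : x < y) :
    (x, y) ∈ pvPairsOf g ↔ x ∈ g ∧ y ∈ g := by
  unfold pvPairsOf
  constructor
  · intro h
    rcases List.mem_flatMap.mp h with ⟨a, ha, hin⟩
    rcases List.mem_map.mp hin with ⟨b, hb, he⟩
    rcases PySem.List.mem_pyRange_one.mp ha with ⟨ha0, haN⟩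
    rcases PySem.List.mem_pyRange_one.mp hb with ⟨hab, hbN⟩
    obtain ⟨an, rfl⟩ := Int.eq_ofNat_of_zero_le ha0
    obtain ⟨bn, rfl⟩ := Int.eq_ofNat_of_zero_le (by omega : (0 : Int) ≤ b)
    have han : an < g.length := by exact_mod_cast haN
    have hbn : bn < g.length := by exact_mod_cast hbN
    rw [pyGetD_eq_getElem g an han, pyGetD_eq_getElem g bn hbn] at he
    rcases Prod.mk.injEq _ _ _ _ ▸ he with ⟨hex, hey⟩
    rw [← hex, ← hey]
    exact ⟨List.getElem_mem han, List.getElem_mem hbn⟩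
  · rintro ⟨hx, hy⟩
    rcases List.mem_iff_getElem.mp hx with ⟨an, han, hax⟩
    rcases List.mem_iff_getElem.mp hy with ⟨bn, hbn, hby⟩
    have hpg := List.pairwise_iff_getElem.mp hg
    have hlt : an < bn := by
      rcases lt_trichotomy an bn with h | h | h
      · exact h
      · exfalso
        rw [← hax, ← hby] at hxy
        subst h
        exact lt_irrefl _ hxy
      · exfalso
        have := hpg bn an hbn han h
        rw [hax, hby] at this
        exact lt_irrefl _ (hxy.trans this)
    apply List.mem_flatMap.mpr
    refine ⟨(an : Int), PySem.List.mem_pyRange_one.mpr ⟨by positivity, by exact_mod_cast han⟩, ?_⟩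
    apply List.mem_map.mpr
    refine ⟨(bn : Int), PySem.List.mem_pyRange_one.mpr ⟨by exact_mod_cast hlt, by exact_mod_cast hbn⟩, ?_⟩
    rw [pyGetD_eq_getElem g an han, pyGetD_eq_getElem g bn hbn, hax, hby]

theorem buckets_flatten (d : PySem.Dict Int (List Int)) (keys : List Int) :
    (PySem.List.enumerate keys).foldl (fun b ik =>
      (PySem.List.enumerate (d.getD ik.2 [])).foldl
        (fun (b : PySem.Dict (Int × Int) (List Int)) pv =>
          b.modify pv [] (fun g => g ++ [ik.1])) b) PySem.Dict.empty
    = (pvE d keys).foldl (fun b e => b.modify e.1 [] (fun g => g ++ [e.2])) PySem.Dict.empty := by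
  unfold pvE
  rw [← foldl_foldl_flatMap]
  apply PySem.List.foldl_congr_mem
  intro b ik _
  rw [List.foldl_map]

theorem buckets_values (d : PySem.Dict Int (List Int)) (keys : List Int) :
    ((PySem.List.enumerate keys).foldl (fun b ik =>
      (PySem.List.enumerate (d.getD ik.2 [])).foldl
        (fun (b : PySem.Dict (Int × Int) (List Int)) pv =>
          b.modify pv [] (fun g => g ++ [ik.1])) b) PySem.Dict.empty).values
    = (PySem.Set.ofList ((pvE d keys).map (·.1))).map (pvGroup d keys) := by
  rw [buckets_flatten]
  have hk : ((pvE d keys).foldl (fun b e => b.modify e.1 [] (fun g => g ++ [e.2]))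
      PySem.Dict.empty).keys = PySem.Set.ofList ((pvE d keys).map (·.1)) := by
    rw [PySem.Dict.keys_foldl_modify_key, PySem.Dict.keys_empty, PySem.Set.update_nil_left]
  have hnd : ((pvE d keys).foldl (fun b e => b.modify e.1 [] (fun g => g ++ [e.2]))
      PySem.Dict.empty).keys.Nodup := by
    apply PySem.Dict.nodup_keys_foldl_modify_key
    exact PySem.Dict.nodup_keys_empty
  rw [PySem.Dict.values_eq_map_keys _ hnd [], hk]
  apply List.map_congr_left
  intro q _
  rw [PySem.Dict.getD_foldl_modify_append]
  simp [pvGroup]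

theorem mem_candIdx (vals : List (List Int)) (pr : Int × Int) :
    pr ∈ vals.foldl (fun (s : PySem.Set (Int × Int)) g =>
      (PySem.List.pyRange 0 (g.length : Int) 1).foldl (fun s a =>
        (PySem.List.pyRange (a + 1) (g.length : Int) 1).foldl (fun s b2 =>
          PySem.Set.add s (PySem.List.pyGetD g a 0, PySem.List.pyGetD g b2 0)) s) s)
      PySem.Set.empty
    ↔ ∃ g ∈ vals, pr ∈ pvPairsOf g := by
  have hfix : vals.foldl (fun (s : PySem.Set (Int × Int)) g =>
      (PySem.List.pyRange 0 (g.length : Int) 1).foldl (fun s a =>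
        (PySem.List.pyRange (a + 1) (g.length : Int) 1).foldl (fun s b2 =>
          PySem.Set.add s (PySem.List.pyGetD g a 0, PySem.List.pyGetD g b2 0)) s) s)
      PySem.Set.empty
      = vals.foldl (fun (s : PySem.Set (Int × Int)) g =>
          (pvPairsOf g).foldl (fun s x => PySem.Set.add s x) s) PySem.Set.empty := by
    apply PySem.List.foldl_congr_mem
    intro s g _
    unfold pvPairsOf
    rw [← foldl_foldl_flatMap]
    apply PySem.List.foldl_congr_mem
    intro s' a _
    rw [List.foldl_map]
  rw [hfix, foldl_foldl_flatMap, PySem.Set.mem_foldl_add (f := fun x => x)]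
  simp only [PySem.Set.empty, List.not_mem_nil, false_or, List.mem_flatMap]
  constructor
  · rintro ⟨b, ⟨g, hg, hb⟩, rfl⟩
    exact ⟨g, hg, hb⟩
  · rintro ⟨g, hg, hb⟩
    exact ⟨pr, ⟨g, hg, hb⟩, rfl⟩

theorem mem_keys_of_mem_group (d : PySem.Dict Int (List Int)) (keys : List Int)
    (q : Int × Int) (i : Int) (h : i ∈ pvGroup d keys q) : q ∈ (pvE d keys).map (·.1) := by
  unfold pvGroup at h
  rcases List.mem_map.mp h with ⟨e, he, _⟩
  rcases List.mem_filter.mp he with ⟨heE, heq⟩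
  exact List.mem_map.mpr ⟨e, heE, eq_of_beq heq⟩

theorem pvMatch_of_eq (v1 v2 : List Int) (p : Nat) (h1 : p < v1.length) (h2 : p < v2.length)
    (he : v1[p] = v2[p]) : pvMatch v1 v2 = true := by
  unfold pvMatch
  apply List.any_eq_true.mpr
  have hp : p < (v1.zip v2).length := by
    rw [List.length_zip]
    omega
  refine ⟨(v1.zip v2)[p], List.getElem_mem hp, ?_⟩
  rw [List.getElem_zip]
  simpa using he

theorem pvMatch_elim (v1 v2 : List Int) (h : pvMatch v1 v2 = true) :
    ∃ (p : Nat) (h1 : p < v1.length) (h2 : p < v2.length), v1[p] = v2[p] := by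
  unfold pvMatch at h
  rcases List.any_eq_true.mp h with ⟨pr, hpr, hpre⟩
  rcases List.mem_iff_getElem.mp hpr with ⟨p, hp, hprv⟩
  have hp1 : p < v1.length := by
    rw [List.length_zip] at hp
    omega
  have hp2 : p < v2.length := by
    rw [List.length_zip] at hp
    omega
  refine ⟨p, hp1, hp2, ?_⟩
  subst hprv
  rw [List.getElem_zip] at hpre
  simpa using hpre

theorem bridge2 (d : PySem.Dict Int (List Int)) (keys : List Int) (i j : Int)
    (hi : 0 ≤ i) (hij : i < j) (hj : j < (keys.length : Int)) :
    (∃ g ∈ (PySem.Set.ofList ((pvE d keys).map (·.1))).map (pvGroup d keys),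
      (i, j) ∈ pvPairsOf g)
    ↔ pvM d (PySem.List.pyGetD keys i 0, PySem.List.pyGetD keys j 0) = true := by
  obtain ⟨i', rfl⟩ := Int.eq_ofNat_of_zero_le hi
  obtain ⟨j', rfl⟩ := Int.eq_ofNat_of_zero_le (by omega : (0 : Int) ≤ j)
  have hj' : j' < keys.length := by exact_mod_cast hj
  have hi'' : i' < keys.length := by
    have h : (i' : Int) < (keys.length : Int) := lt_trans hij hj
    exact_mod_cast h
  show _ ↔ pvM d (PySem.List.pyGetD keys (i' : Int) 0, PySem.List.pyGetD keys (j' : Int) 0) = true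
  rw [pyGetD_eq_getElem keys i' hi'', pyGetD_eq_getElem keys j' hj']
  show _ ↔ pvMatch (d.getD keys[i'] []) (d.getD keys[j'] []) = true
  constructor
  · rintro ⟨g, hg, hpair⟩
    rcases List.mem_map.mp hg with ⟨q, _, rfl⟩
    rcases (mem_pvPairsOf _ (pvGroup_pairwise d keys q) _ _ hij).mp hpair with ⟨hiq, hjq⟩
    rcases (mem_pvGroup d keys q _).mp hiq with ⟨a, ha, hia, p, hp, hqa⟩
    rcases (mem_pvGroup d keys q _).mp hjq with ⟨b, hb, hjb, p2, hp2, hqb⟩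
    have haa : a = i' := by exact_mod_cast hia.symm
    have hbb : b = j' := by exact_mod_cast hjb.symm
    subst haa
    subst hbb
    rw [hqa] at hqb
    have hpp : p = p2 := by
      have h := congrArg Prod.fst hqb
      simpa using h
    subst hpp
    have hvv := congrArg Prod.snd hqb
    simp only at hvv
    exact pvMatch_of_eq _ _ p hp hp2 hvv
  · intro hmatch
    rcases pvMatch_elim _ _ hmatch with ⟨p, hp1, hp2, hveq⟩
    have hiG : ((i' : Nat) : Int) ∈ pvGroup d keys ((p : Int), (d.getD keys[i'] [])[p]) :=
      (mem_pvGroup d keys _ _).mpr ⟨i', hi'', rfl, p, hp1, rfl⟩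
    have hjG : ((j' : Nat) : Int) ∈ pvGroup d keys ((p : Int), (d.getD keys[i'] [])[p]) :=
      (mem_pvGroup d keys _ _).mpr ⟨j', hj', rfl, p, hp2, by rw [hveq]⟩
    refine ⟨pvGroup d keys ((p : Int), (d.getD keys[i'] [])[p]),
      List.mem_map.mpr ⟨_, ?_, rfl⟩, ?_⟩
    · exact (PySem.Set.mem_ofList _ _).mpr (mem_keys_of_mem_group d keys _ _ hiG)
    · exact (mem_pvPairsOf _ (pvGroup_pairwise d keys _) _ _ hij).mpr ⟨hiG, hjG⟩

theorem B_final (d : PySem.Dict Int (List Int)) (keys : List Int) (hnd : keys.Nodup)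
    (cI : List (Int × Int))
    (hiff : ∀ i j : Int, 0 ≤ i → i < j → j < (keys.length : Int) →
      ((i, j) ∈ cI ↔ pvM d (PySem.List.pyGetD keys i 0, PySem.List.pyGetD keys j 0) = true)) :
    (PySem.List.pyRange 0 (keys.length : Int) 1).foldl (fun acc i =>
      (PySem.List.pyRange (i + 1) (keys.length : Int) 1).foldl
        (fun (acc : List (Int × Int) × List (Int × Int)) j =>
          if (i, j) ∈ cI then
            (PySem.Set.add acc.1 (PySem.List.pyGetD keys i 0, PySem.List.pyGetD keys j 0), acc.2)
          else
            (acc.1, PySem.Set.add acc.2 (PySem.List.pyGetD keys i 0, PySem.List.pyGetD keys j 0)))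
        acc) (([] : List (Int × Int)), ([] : List (Int × Int)))
    = ((triPairs keys).filter (pvM d), (triPairs keys).filter (fun pr => !pvM d pr)) := by
  set L : List (Int × Int) := (PySem.List.pyRange 0 (keys.length : Int) 1).flatMap (fun i =>
    (PySem.List.pyRange (i + 1) (keys.length : Int) 1).map (fun j => (i, j))) with hL
  set f : Int × Int → Int × Int :=
    fun pr => (PySem.List.pyGetD keys pr.1 0, PySem.List.pyGetD keys pr.2 0) with hf
  have hLf : L.map f = triPairs keys := by
    rw [hL, flatMap_map, ← triIdx_map_eq keys]
    apply flatMap_congr_mem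
    intro i _
    rw [List.map_map]
    apply List.map_congr_left
    intro j _
    rfl
  have hmemL : ∀ pr ∈ L, 0 ≤ pr.1 ∧ pr.1 < pr.2 ∧ pr.2 < (keys.length : Int) := by
    intro pr hpr
    rw [hL] at hpr
    rcases List.mem_flatMap.mp hpr with ⟨i, hiR, hin⟩
    rcases List.mem_map.mp hin with ⟨j, hjR, rfl⟩
    rcases PySem.List.mem_pyRange_one.mp hiR with ⟨h1, h2⟩
    rcases PySem.List.mem_pyRange_one.mp hjR with ⟨h3, h4⟩
    exact ⟨h1, by omega, h4⟩
  have h1 : (PySem.List.pyRange 0 (keys.length : Int) 1).foldl (fun acc i =>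
      (PySem.List.pyRange (i + 1) (keys.length : Int) 1).foldl
        (fun (acc : List (Int × Int) × List (Int × Int)) j =>
          if (i, j) ∈ cI then
            (PySem.Set.add acc.1 (PySem.List.pyGetD keys i 0, PySem.List.pyGetD keys j 0), acc.2)
          else
            (acc.1, PySem.Set.add acc.2 (PySem.List.pyGetD keys i 0, PySem.List.pyGetD keys j 0)))
        acc) (([] : List (Int × Int)), ([] : List (Int × Int)))
      = L.foldl (fun acc pr =>
          if (pr.1, pr.2) ∈ cI then (PySem.Set.add acc.1 (f pr), acc.2)
          else (acc.1, PySem.Set.add acc.2 (f pr))) ([], []) := by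
    rw [hL, ← foldl_foldl_flatMap]
    apply PySem.List.foldl_congr_mem
    intro acc i _
    exact (List.foldl_map (f := fun j => ((i : Int), j))
      (g := fun acc pr => if (pr.1, pr.2) ∈ cI then (PySem.Set.add acc.1 (f pr), acc.2)
        else (acc.1, PySem.Set.add acc.2 (f pr)))
      (l := PySem.List.pyRange (i + 1) (keys.length : Int) 1) (init := acc)).symm
  rw [h1, split_add f (fun pr => (pr.1, pr.2) ∈ cI) L [] []
    (by rw [hLf]; exact nodup_triPairs keys hnd) (by intro x hx; simp)]
  have hcong : ∀ pr ∈ L, (decide ((pr.1, pr.2) ∈ cI)) = pvM d (f pr) := by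
    intro pr hpr
    rcases hmemL pr hpr with ⟨hp0, hp1, hp2⟩
    have hiff' := hiff pr.1 pr.2 hp0 hp1 hp2
    by_cases hc : (pr.1, pr.2) ∈ cI
    · have hv : pvM d (f pr) = true := hiff'.mp hc
      rw [hv]
      simpa using hc
    · have hv : pvM d (f pr) = false := by
        cases h : pvM d (f pr)
        · rfl
        · exact absurd (hiff'.mpr h) hc
      rw [hv]
      simpa using hc
  have hcong2 : ∀ pr ∈ L, (!decide ((pr.1, pr.2) ∈ cI)) = !pvM d (f pr) := by
    intro pr hpr
    rw [hcong pr hpr]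
  rw [List.nil_append, List.nil_append, List.filter_congr hcong, List.filter_congr hcong2,
    show (fun x => pvM d (f x)) = (pvM d ∘ f) from rfl,
    show (fun x => !pvM d (f x)) = ((fun y => !pvM d y) ∘ f) from rfl,
    ← List.filter_map, ← List.filter_map, hLf]

theorem B_eq (subvectors : List (Int × List Int)) :
    find_candidate_pairs_alt subvectors = pvTarget subvectors := by
  unfold find_candidate_pairs_alt pvTarget
  refine B_final (PySem.Dict.ofList subvectors) (PySem.Dict.ofList subvectors).keys
    (PySem.Dict.nodup_keys_ofList subvectors) _ ?_
  intro i j h0 hij hj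
  rw [mem_candIdx, buckets_values]
  exact bridge2 _ _ i j h0 hij hj

-- ===== VERDICT (by name: the statement is the Claim_ definition above) =====
theorem find_candidate_pairs_spec : Claim_equal_find_candidate_pairs := by
  intro sv _
  unfold Spec_find_candidate_pairs
  rw [A_eq, B_eq]
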